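-- pv_equiv track=rewrite | github.com/waldiez/waldiez | waldiez/exporting/skills/utils.py | _sort_imports
-- ===== SOURCE A (Python) =====
-- from typing import Callable, Dict, List, Optional, Tuple, Union
--
-- def _sort_imports(
--     skill_imports: Tuple[List[str], List[str], List[str]],
-- ) -> Tuple[List[str], List[str], List[str]]:
--     """Sort the imports.
--
--     Parameters
--     ----------
--     skill_imports : Tuple[List[str], List[str], List[str]]
--         The skill imports.
--
--     Returns
--     -------
--     Tuple[List[str], List[str], List[str]]
--         The sorted skill imports.
--     """
--     # "from x import y" and "import z"
--     # the "import a" should be first (and sorted)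
--     # then the "from b import c" (and sorted)
--     standard_lib_imports = skill_imports[0]
--     third_party_imports = skill_imports[1]
--     secrets_imports = skill_imports[2]
--
--     sorted_standard_lib_imports = sorted(
--         [imp for imp in standard_lib_imports if imp.startswith("import ")]
--     ) + sorted([imp for imp in standard_lib_imports if imp.startswith("from ")])
--
--     sorted_third_party_imports = sorted(
--         [imp for imp in third_party_imports if imp.startswith("import ")]
--     ) + sorted([imp for imp in third_party_imports if imp.startswith("from ")])
--
--     sorted_secrets_imports = sorted(secrets_imports)
--
--     return (
--         sorted_standard_lib_imports,
--         sorted_third_party_imports,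
--         sorted_secrets_imports,
--     )
-- ===== SOURCE B (Python) =====
-- from typing import List, Tuple
--
--
-- def _sort_imports(
--     skill_imports: Tuple[List[str], List[str], List[str]],
-- ) -> Tuple[List[str], List[str], List[str]]:
--     """Sort the imports (single keyed sort per group)."""
--
--     def sort_group(imports: List[str]) -> List[str]:
--         kept = [imp for imp in imports if imp.startswith(("import ", "from "))]
--         return sorted(kept, key=lambda imp: (0 if imp.startswith("import ") else 1, imp))
--
--     return (
--         sort_group(skill_imports[0]),
--         sort_group(skill_imports[1]),
--         sorted(skill_imports[2]),
--     )
-- ===== Notes on version B (the rewrite author's own statement) =====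
-- stated objective: simpler
-- what changed: Replaces A's partition-into-two-lists-then-two-sorts-then-concatenate (done twice inline) with one shared helper that filters once and does a single sort with a (prefix-rank, string) key.
import Mathlib
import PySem

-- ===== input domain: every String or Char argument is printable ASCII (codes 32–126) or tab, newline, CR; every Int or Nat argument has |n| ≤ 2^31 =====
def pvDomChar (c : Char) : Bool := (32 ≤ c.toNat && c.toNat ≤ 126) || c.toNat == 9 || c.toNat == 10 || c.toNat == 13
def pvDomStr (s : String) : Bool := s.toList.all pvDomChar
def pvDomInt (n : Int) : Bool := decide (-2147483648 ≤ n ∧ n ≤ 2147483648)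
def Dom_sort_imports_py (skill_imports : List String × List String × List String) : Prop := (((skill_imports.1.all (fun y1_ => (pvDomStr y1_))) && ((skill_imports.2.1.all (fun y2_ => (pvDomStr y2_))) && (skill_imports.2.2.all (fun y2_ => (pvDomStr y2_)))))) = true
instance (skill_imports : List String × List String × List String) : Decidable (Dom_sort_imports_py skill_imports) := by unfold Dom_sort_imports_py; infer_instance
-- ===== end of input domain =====

-- B replaces A's partition-into-two-lists-then-two-sorts-then-concatenate (written out twice)
-- with one shared helper doing a single filter and a single keyed sort; objective: simpler.

-- ===== PORT A =====
def sort_imports_py (skill_imports : List String × List String × List String) : List String × List String × List String :=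
  let standard_lib_imports := skill_imports.1
  let third_party_imports := skill_imports.2.1
  let secrets_imports := skill_imports.2.2
  let sorted_standard_lib_imports :=
    PySem.List.sorted (standard_lib_imports.filter (fun imp => PySem.Str.startswith imp "import ")) (fun x => x) false
    ++ PySem.List.sorted (standard_lib_imports.filter (fun imp => PySem.Str.startswith imp "from ")) (fun x => x) false
  let sorted_third_party_imports :=
    PySem.List.sorted (third_party_imports.filter (fun imp => PySem.Str.startswith imp "import ")) (fun x => x) false
    ++ PySem.List.sorted (third_party_imports.filter (fun imp => PySem.Str.startswith imp "from ")) (fun x => x) false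
  let sorted_secrets_imports := PySem.List.sorted secrets_imports (fun x => x) false
  (sorted_standard_lib_imports, sorted_third_party_imports, sorted_secrets_imports)

-- ===== PORT B =====
-- sort_group of Source B: keep the strings with one of the two prefixes, sort once by (rank, string)
def pvSortGroup (imports : List String) : List String :=
  PySem.List.sorted2
    (imports.filter (fun imp => PySem.Str.startswith imp "import " || PySem.Str.startswith imp "from "))
    (fun imp => if PySem.Str.startswith imp "import " then (0 : Nat) else 1)
    (fun imp => imp) false

def sort_imports_py_alt (skill_imports : List String × List String × List String) : List String × List String × List String :=
  (pvSortGroup skill_imports.1, pvSortGroup skill_imports.2.1,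
   PySem.List.sorted skill_imports.2.2 (fun x => x) false)

-- ===== PRECONDITION & SPEC =====
def Spec_sort_imports_py (skill_imports : List String × List String × List String) (out : List String × List String × List String) : Prop := out = sort_imports_py_alt skill_imports
instance (skill_imports : List String × List String × List String) (out : List String × List String × List String) : Decidable (Spec_sort_imports_py skill_imports out) := by unfold Spec_sort_imports_py; infer_instance

-- ===== CLAIM (what is proved, stated in full; the proofs are below) =====
def Claim_equal_sort_imports_py : Prop := ∀ (skill_imports : List String × List String × List String), Dom_sort_imports_py skill_imports → Spec_sort_imports_py skill_imports (sort_imports_py skill_imports)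

-- ===== LEMMAS AND PROOFS =====

-- the combined sort key of B, as one linearly ordered value
def pvKey (s : String) : Lex (Nat × String) :=
  toLex (if PySem.Str.startswith s "import " then (0 : Nat) else 1, s)

theorem pvKey_injective : Function.Injective pvKey := by
  intro a b h
  exact congrArg (fun x => (ofLex x).2) h

theorem startswith_from_not_import (s : String) (h : PySem.Str.startswith s "from " = true) :
    PySem.Str.startswith s "import " = false := by
  simp only [PySem.Str.startswith, PySem.Chars.startswith] at *
  cases hs : s.toList with
  | nil => rw [hs] at h; simp at h
  | cons c t =>
    rw [hs] at h
    have hc : c = 'f' := by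
      rw [show ("from ").toList = 'f' :: ['r','o','m',' '] from rfl, List.isPrefixOf] at h
      simp only [Bool.and_eq_true, beq_iff_eq] at h
      exact h.1.symm
    subst hc
    rw [show ("import ").toList = 'i' :: ['m','p','o','r','t',' '] from rfl, List.isPrefixOf]
    simp

-- a sorted2 with a Nat first key and the string itself as second key is the plain
-- PySem sort under the corresponding lexicographic key
theorem sorted2_eq_sorted_lex (xs : List String) (k1 : String → Nat) :
    PySem.List.sorted2 xs k1 (fun s => s) false
    = PySem.List.sorted xs (fun s => toLex (k1 s, s)) false := by
  have hb : (fun (a b : String) =>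
        decide (k1 a < k1 b) || (!decide (k1 b < k1 a) && decide (a < b)))
      = fun (a b : String) => decide (toLex (k1 a, a) < toLex (k1 b, b)) := by
    funext a b
    rw [Bool.eq_iff_iff]
    simp only [Bool.or_eq_true, Bool.and_eq_true, Bool.not_eq_true',
      decide_eq_true_eq, decide_eq_false_iff_not, Prod.Lex.lt_iff, ofLex_toLex]
    constructor
    · rintro (h | ⟨h1, h2⟩)
      · exact Or.inl h
      · by_cases h3 : k1 a < k1 b
        · exact Or.inl h3
        · exact Or.inr ⟨by omega, h2⟩
    · rintro (h | ⟨h1, h2⟩)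
      · exact Or.inl h
      · exact Or.inr ⟨by omega, h2⟩
  calc PySem.List.sorted2 xs k1 (fun s => s) false
      = xs.foldl (fun acc x => PySem.List.insertBy
          (fun a b => decide (k1 a < k1 b) || (!decide (k1 b < k1 a) && decide (a < b))) x acc) [] := rfl
    _ = xs.foldl (fun acc x => PySem.List.insertBy
          (fun a b => decide (toLex (k1 a, a) < toLex (k1 b, b))) x acc) [] := by rw [hb]
    _ = PySem.List.sorted xs (fun s => toLex (k1 s, s)) false := rfl

-- the two disjoint filters of A, concatenated, are a permutation of B's single filter
theorem filter_or_perm (xs : List String) :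
    (xs.filter (fun s => PySem.Str.startswith s "import ")
      ++ xs.filter (fun s => PySem.Str.startswith s "from ")).Perm
    (xs.filter (fun s => PySem.Str.startswith s "import " || PySem.Str.startswith s "from ")) := by
  induction xs with
  | nil => simp
  | cons x t ih =>
    by_cases hi : PySem.Str.startswith x "import "
    · have hf : PySem.Str.startswith x "from " = false := by
        cases hfe : PySem.Str.startswith x "from " with
        | false => rfl
        | true => rw [startswith_from_not_import x hfe] at hi; exact (Bool.false_ne_true hi).elim
      simp only [List.filter_cons, hi, hf, Bool.false_eq_true, if_true, if_false,
        Bool.true_or, List.cons_append]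
      exact ih.cons x
    · by_cases hf : PySem.Str.startswith x "from "
      · simp only [List.filter_cons, eq_false_of_ne_true hi, hf, Bool.false_eq_true,
          if_true, if_false, Bool.false_or]
        exact (List.perm_middle).trans (ih.cons x)
      · simp only [List.filter_cons, eq_false_of_ne_true hi, eq_false_of_ne_true hf,
          Bool.false_eq_true, if_false, Bool.or_self]
        exact ih

-- A's two-block result is pairwise nondecreasing under pvKey
theorem pairwise_A_side (xs : List String) :
    (PySem.List.sorted (xs.filter (fun s => PySem.Str.startswith s "import ")) (fun x => x) false
      ++ PySem.List.sorted (xs.filter (fun s => PySem.Str.startswith s "from ")) (fun x => x) false).Pairwise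
      (fun a b => pvKey a ≤ pvKey b) := by
  rw [List.pairwise_append]
  refine ⟨?_, ?_, ?_⟩
  · refine (PySem.List.sorted_pairwise _ (fun x => x)).imp_of_mem ?_
    intro a b hma hmb hab
    have ha : PySem.Str.startswith a "import " = true :=
      (List.mem_filter.mp ((PySem.List.mem_sorted _ _ _ _).mp hma)).2
    have hb : PySem.Str.startswith b "import " = true :=
      (List.mem_filter.mp ((PySem.List.mem_sorted _ _ _ _).mp hmb)).2
    simp only [pvKey, ha, hb, if_true]
    rw [Prod.Lex.le_iff]
    exact Or.inr ⟨rfl, hab⟩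
  · refine (PySem.List.sorted_pairwise _ (fun x => x)).imp_of_mem ?_
    intro a b hma hmb hab
    have ha := startswith_from_not_import a
      (List.mem_filter.mp ((PySem.List.mem_sorted _ _ _ _).mp hma)).2
    have hb := startswith_from_not_import b
      (List.mem_filter.mp ((PySem.List.mem_sorted _ _ _ _).mp hmb)).2
    simp only [pvKey, ha, hb, Bool.false_eq_true, if_false]
    rw [Prod.Lex.le_iff]
    exact Or.inr ⟨rfl, hab⟩
  · intro a hma b hmb
    have ha : PySem.Str.startswith a "import " = true :=
      (List.mem_filter.mp ((PySem.List.mem_sorted _ _ _ _).mp hma)).2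
    have hb := startswith_from_not_import b
      (List.mem_filter.mp ((PySem.List.mem_sorted _ _ _ _).mp hmb)).2
    simp only [pvKey, ha, hb, Bool.false_eq_true, if_true, if_false]
    rw [Prod.Lex.le_iff]
    refine Or.inl ?_
    simp

-- per-group equality: B's single keyed sort = A's two sorted blocks
theorem group_eq (xs : List String) :
    pvSortGroup xs
    = PySem.List.sorted (xs.filter (fun s => PySem.Str.startswith s "import ")) (fun x => x) false
      ++ PySem.List.sorted (xs.filter (fun s => PySem.Str.startswith s "from ")) (fun x => x) false := by
  have hperm : (pvSortGroup xs).Perm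
      (PySem.List.sorted (xs.filter (fun s => PySem.Str.startswith s "import ")) (fun x => x) false
        ++ PySem.List.sorted (xs.filter (fun s => PySem.Str.startswith s "from ")) (fun x => x) false) := by
    refine (PySem.List.sorted2_perm _ _ _ _).trans ?_
    exact ((filter_or_perm xs).symm).trans
      (((PySem.List.sorted_perm _ _ _).append (PySem.List.sorted_perm _ _ _)).symm)
  have hpw1 : (pvSortGroup xs).Pairwise (fun a b => pvKey a ≤ pvKey b) := by
    rw [pvSortGroup, sorted2_eq_sorted_lex]
    exact PySem.List.sorted_pairwise _ _
  exact PySem.List.eq_of_perm_of_pairwise_le_of_injective pvKey pvKey_injective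
    hperm hpw1 (pairwise_A_side xs)

-- ===== VERDICT (by name: the statement is the Claim_ definition above) =====
theorem sort_imports_py_spec : Claim_equal_sort_imports_py := by
  intro si _
  show sort_imports_py si = sort_imports_py_alt si
  simp only [sort_imports_py, sort_imports_py_alt, group_eq]
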